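-- pv_equiv track=rewrite | github.com/CelebiProjects/Celebi | CelebiChrono/interface/merge_resolver.py | _group_conflicts_by_type
-- ===== SOURCE A (Python) =====
-- from typing import Dict, List, Any, Optional, Tuple
--
-- def _group_conflicts_by_type(conflicts: List[Dict]) -> Dict[str, List[Dict]]:
--     """Group conflicts by their type."""
--     groups = {}
--
--     for conflict in conflicts:
--         conflict_type = conflict.get('type', 'unknown')
--
--         # Map to broader categories
--         if 'dag' in conflict_type or 'cycle' in conflict_type or 'edge' in conflict_type:
--             category = 'dag'
--         elif 'config' in conflict_type or 'yaml' in conflict_type or 'json' in conflict_type: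
--             category = 'config'
--         elif 'uuid' in conflict_type:
--             category = 'uuid'
--         elif 'alias' in conflict_type:
--             category = 'alias'
--         else:
--             category = 'other'
--
--         if category not in groups:
--             groups[category] = []
--         groups[category].append(conflict)
--
--     return groups
-- ===== SOURCE B (Python) =====
-- def _group_conflicts_by_type(conflicts):
--     """Group conflicts by their type."""
--     rules = [("dag", ("dag", "cycle", "edge")),
--              ("config", ("config", "yaml", "json")),
--              ("uuid", ("uuid",)),
--              ("alias", ("alias",))]
--
--     def classify(conflict):
--         ctype = conflict.get('type', 'unknown')
--         for category, keywords in rules: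
--             if any(kw in ctype for kw in keywords):
--                 return category
--         return 'other'
--
--     cats = [classify(c) for c in conflicts]
--     order = list(dict.fromkeys(cats))
--     return {cat: [c for c, k in zip(conflicts, cats) if k == cat] for cat in order}
-- ===== Notes on version B (the rewrite author's own statement) =====
-- stated objective: idiomatic
-- what changed: Replaces the hard-coded if/elif cascade and in-loop dict mutation with a data-driven rule table scanned per conflict, a classification pass, an ordered key dedup, and a grouping dict comprehension built by filtering.
import Mathlib
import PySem

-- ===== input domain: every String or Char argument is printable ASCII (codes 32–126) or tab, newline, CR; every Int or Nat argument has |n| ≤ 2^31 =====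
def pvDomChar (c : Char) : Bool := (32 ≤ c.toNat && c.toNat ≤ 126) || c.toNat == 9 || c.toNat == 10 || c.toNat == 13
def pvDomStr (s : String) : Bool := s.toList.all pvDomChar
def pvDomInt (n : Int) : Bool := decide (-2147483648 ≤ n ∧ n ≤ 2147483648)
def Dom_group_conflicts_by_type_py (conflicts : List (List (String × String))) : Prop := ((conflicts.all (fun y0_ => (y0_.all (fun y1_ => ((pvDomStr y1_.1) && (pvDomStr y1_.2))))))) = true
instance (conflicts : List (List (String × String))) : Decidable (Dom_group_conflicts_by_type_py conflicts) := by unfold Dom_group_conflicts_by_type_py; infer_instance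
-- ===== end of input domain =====

-- B replaces A's hard-coded if/elif cascade and in-loop dict mutation with a rule table,
-- a classification pass, an ordered dedup of categories and a grouping dict comprehension (idiomatic, same cost).

-- ===== PORT A =====
def group_conflicts_by_type_py (conflicts : List (List (String × String))) : List (String × List (List (String × String))) :=
  (conflicts.foldl (fun groups conflict =>
      let conflict_type := (PySem.Dict.mk conflict).getD "type" "unknown"
      let category :=
        if PySem.Str.isIn "dag" conflict_type || PySem.Str.isIn "cycle" conflict_type || PySem.Str.isIn "edge" conflict_type then "dag"
        else if PySem.Str.isIn "config" conflict_type || PySem.Str.isIn "yaml" conflict_type || PySem.Str.isIn "json" conflict_type then "config"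
        else if PySem.Str.isIn "uuid" conflict_type then "uuid"
        else if PySem.Str.isIn "alias" conflict_type then "alias"
        else "other"
      let groups := if groups.contains category then groups else groups.insert category []
      groups.modify category [] (fun l => l ++ [conflict]))
    PySem.Dict.empty).items

-- ===== PORT B =====
-- Source B's inner 'classify': scan the rule table, first rule one of whose keywords occurs in the type wins
def pvScanRules (rules : List (String × List String)) (ctype : String) : String :=
  match rules with
  | [] => "other"
  | (category, keywords) :: rest =>
      if keywords.any (fun kw => PySem.Str.isIn kw ctype) then category else pvScanRules rest ctype

def pvClassify (rules : List (String × List String)) (conflict : List (String × String)) : String :=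
  pvScanRules rules ((PySem.Dict.mk conflict).getD "type" "unknown")

def pvRules : List (String × List String) :=
  [("dag", ["dag", "cycle", "edge"]),
   ("config", ["config", "yaml", "json"]),
   ("uuid", ["uuid"]),
   ("alias", ["alias"])]

def group_conflicts_by_type_py_alt (conflicts : List (List (String × String))) : List (String × List (List (String × String))) :=
  let cats := conflicts.map (pvClassify pvRules)
  let order := PySem.List.dedup cats
  (order.foldl (fun d cat =>
      d.insert cat (((conflicts.zip cats).filter (fun p => p.2 == cat)).map (·.1)))
    PySem.Dict.empty).items

-- ===== PRECONDITION & SPEC =====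
def Spec_group_conflicts_by_type_py (conflicts : List (List (String × String))) (out : List (String × List (List (String × String)))) : Prop := out = group_conflicts_by_type_py_alt conflicts
instance (conflicts : List (List (String × String))) (out : List (String × List (List (String × String)))) : Decidable (Spec_group_conflicts_by_type_py conflicts out) := by unfold Spec_group_conflicts_by_type_py; infer_instance

-- ===== CLAIM (what is proved, stated in full; the proofs are below) =====
def Claim_equal_group_conflicts_by_type_py : Prop := ∀ (conflicts : List (List (String × String))), Dom_group_conflicts_by_type_py conflicts → Spec_group_conflicts_by_type_py conflicts (group_conflicts_by_type_py conflicts)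

-- ===== LEMMAS AND PROOFS =====

-- A's category of a conflict (proof-side name for the if/elif chain in the port)
def pvCatA (conflict : List (String × String)) : String :=
  let conflict_type := (PySem.Dict.mk conflict).getD "type" "unknown"
  if PySem.Str.isIn "dag" conflict_type || PySem.Str.isIn "cycle" conflict_type || PySem.Str.isIn "edge" conflict_type then "dag"
  else if PySem.Str.isIn "config" conflict_type || PySem.Str.isIn "yaml" conflict_type || PySem.Str.isIn "json" conflict_type then "config"
  else if PySem.Str.isIn "uuid" conflict_type then "uuid"
  else if PySem.Str.isIn "alias" conflict_type then "alias"
  else "other"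

-- A's loop body, named
def pvStepA (d : PySem.Dict String (List (List (String × String)))) (x : List (String × String)) : PySem.Dict String (List (List (String × String))) :=
  (if d.contains (pvCatA x) then d else d.insert (pvCatA x) []).modify (pvCatA x) [] (fun l => l ++ [x])

theorem pvA_eq (conflicts : List (List (String × String))) :
    group_conflicts_by_type_py conflicts = (conflicts.foldl pvStepA PySem.Dict.empty).items := rfl

theorem pvClassify_eq_catA (x : List (String × String)) : pvClassify pvRules x = pvCatA x := by
  simp only [pvClassify, pvRules, pvScanRules, pvCatA, List.any_cons, List.any_nil, Bool.or_false, Bool.or_assoc]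

theorem pvKeys_stepA (d : PySem.Dict String (List (List (String × String)))) (x : List (String × String)) :
    (pvStepA d x).keys = PySem.Set.add d.keys (pvCatA x) := by
  unfold pvStepA
  by_cases h : d.contains (pvCatA x) = true
  · rw [if_pos h, PySem.Dict.keys_modify, PySem.Dict.keys_insert_of_contains d _ h,
      PySem.Set.add_of_mem (by exact (PySem.Dict.contains_iff_mem_keys d (pvCatA x)).mp h)]
  · rw [if_neg h, PySem.Dict.keys_modify,
      PySem.Dict.keys_insert_of_contains _ _ (PySem.Dict.contains_insert_self d (pvCatA x) []),
      PySem.Dict.keys_insert_of_not_contains d _ (by simpa using h),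
      PySem.Set.add_of_not_mem (fun hm => h ((PySem.Dict.contains_iff_mem_keys d (pvCatA x)).mpr hm))]

theorem pvGetD_stepA (d : PySem.Dict String (List (List (String × String)))) (x : List (String × String)) (c : String) :
    (pvStepA d x).getD c [] = if c = pvCatA x then d.getD c [] ++ [x] else d.getD c [] := by
  unfold pvStepA
  by_cases h : d.contains (pvCatA x) = true
  · rw [if_pos h, PySem.Dict.getD_modify]
    by_cases hc : c = pvCatA x
    · simp [hc]
    · simp [hc]
  · rw [if_neg h]
    simp only [PySem.Dict.getD_modify, PySem.Dict.getD_insert]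
    have h0 : d.getD (pvCatA x) [] = [] :=
      PySem.Dict.getD_of_not_contains d [] (by simpa using h)
    by_cases hc : c = pvCatA x
    · simp [hc, h0]
    · simp [hc]

theorem pvFold_keys (xs : List (List (String × String))) (d : PySem.Dict String (List (List (String × String)))) :
    (xs.foldl pvStepA d).keys = PySem.Set.update d.keys (xs.map pvCatA) := by
  induction xs generalizing d with
  | nil => simp [PySem.Set.update_nil]
  | cons x xs ih =>
      rw [List.foldl_cons, ih, List.map_cons, PySem.Set.update_cons, pvKeys_stepA]

theorem pvFold_nodup (xs : List (List (String × String))) (d : PySem.Dict String (List (List (String × String))))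
    (hd : d.keys.Nodup) : (xs.foldl pvStepA d).keys.Nodup := by
  induction xs generalizing d with
  | nil => exact hd
  | cons x xs ih =>
      rw [List.foldl_cons]
      exact ih _ (by rw [pvKeys_stepA]; exact PySem.Set.nodup_add _ _ hd)

theorem pvFold_getD (xs : List (List (String × String))) (d : PySem.Dict String (List (List (String × String)))) (c : String) :
    (xs.foldl pvStepA d).getD c [] = d.getD c [] ++ xs.filter (fun x => pvCatA x == c) := by
  induction xs generalizing d with
  | nil => simp
  | cons x xs ih =>
      rw [List.foldl_cons, ih, pvGetD_stepA, List.filter_cons]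
      by_cases hc : pvCatA x = c
      · simp [hc]
      · simp [hc, Ne.symm hc]

theorem pvA_closed (conflicts : List (List (String × String))) :
    group_conflicts_by_type_py conflicts =
      (PySem.Set.ofList (conflicts.map pvCatA)).map
        (fun c => (c, conflicts.filter (fun x => pvCatA x == c))) := by
  rw [pvA_eq, PySem.Dict.items_eq_map_keys _ (pvFold_nodup conflicts PySem.Dict.empty (by simp [PySem.Dict.keys_empty])) []]
  rw [pvFold_keys]
  refine List.map_congr_left (fun c _ => ?_)
  rw [pvFold_getD]
  simp [PySem.Dict.getD_empty]

theorem pvB_closed (conflicts : List (List (String × String))) :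
    group_conflicts_by_type_py_alt conflicts =
      (PySem.List.dedup (conflicts.map (pvClassify pvRules))).map
        (fun c => (c, ((conflicts.zip (conflicts.map (pvClassify pvRules))).filter (fun p => p.2 == c)).map (·.1))) := by
  simp only [group_conflicts_by_type_py_alt]
  rw [PySem.Dict.items_foldl_insert_fresh
      (PySem.List.dedup (conflicts.map (pvClassify pvRules))) (fun cat => cat)
      (fun cat => ((conflicts.zip (conflicts.map (pvClassify pvRules))).filter (fun p => p.2 == cat)).map (·.1))
      PySem.Dict.empty (fun a _ => PySem.Dict.contains_empty a)
      (by simp)]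
  simp
  rfl

theorem pvZipFilter (conflicts : List (List (String × String))) (c : String) :
    ((conflicts.zip (conflicts.map (pvClassify pvRules))).filter (fun p => p.2 == c)).map (·.1)
      = conflicts.filter (fun x => pvCatA x == c) := by
  have h : conflicts.zip (conflicts.map (pvClassify pvRules))
      = conflicts.map (fun x => (x, pvClassify pvRules x)) := by
    calc conflicts.zip (conflicts.map (pvClassify pvRules))
        = (conflicts.map id).zip (conflicts.map (pvClassify pvRules)) := by rw [List.map_id]
      _ = conflicts.map (fun x => (x, pvClassify pvRules x)) := List.zip_map'
  rw [h, List.filter_map, List.map_map]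
  simp [Function.comp_def, pvClassify_eq_catA]

-- ===== VERDICT (by name: the statement is the Claim_ definition above) =====
theorem group_conflicts_by_type_py_spec : Claim_equal_group_conflicts_by_type_py := by
  intro conflicts _
  unfold Spec_group_conflicts_by_type_py
  rw [pvA_closed, pvB_closed]
  have hmap : conflicts.map (pvClassify pvRules) = conflicts.map pvCatA :=
    List.map_congr_left (fun x _ => pvClassify_eq_catA x)
  refine ?_
  rw [show PySem.List.dedup (conflicts.map (pvClassify pvRules)) = PySem.Set.ofList (conflicts.map pvCatA) by
    rw [PySem.List.dedup_eq_ofList, hmap]]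
  exact (List.map_congr_left (fun c _ => by rw [pvZipFilter])).symm
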